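-- pv_equiv track=rewrite | github.com/Aldrumont/insidegg | detect_colors.py | transform_to_dict_with_longest_period
-- ===== SOURCE A (Python) =====
-- from itertools import groupby
--
-- def transform_to_dict_with_longest_period(colors):
--     longest_runs = {}
--     for color, group in groupby(enumerate(colors), key=lambda x: x[1]):
--         group_list = list(group)
--         start = group_list[0][0]
--         run_length = len(group_list) - 1  # same as original: period = end_index - start_index
--         if color not in longest_runs or run_length > longest_runs[color][1]:
--             longest_runs[color] = (start, run_length)
--     # Return a dict mapping color to the start index of its longest period.
--     return {color: start for color, (start, _) in longest_runs.items()}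
-- ===== SOURCE B (Python) =====
-- def transform_to_dict_with_longest_period(colors):
--     positions = {}
--     for i, color in enumerate(colors):
--         positions.setdefault(color, []).append(i)
--     return {color: _longest_run_start(pos) for color, pos in positions.items()}
--
--
-- def _longest_run_start(pos):
--     best_start, best_len = pos[0], 1
--     start, length = pos[0], 1
--     for p in pos[1:]:
--         if p == start + length:
--             length += 1
--         else:
--             if length > best_len:
--                 best_start, best_len = start, length
--             start, length = p, 1
--     if length > best_len:
--         best_start, best_len = start, length
--     return best_start
-- ===== Notes on version B (the rewrite author's own statement) =====
-- stated objective: alternative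
-- what changed: Replaces groupby's single consecutive-run scan with a group-by-value positions index (color -> list of indices) built in one pass, then a per-color streak scan over each position list to find the start of the earliest longest run.
import Mathlib
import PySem

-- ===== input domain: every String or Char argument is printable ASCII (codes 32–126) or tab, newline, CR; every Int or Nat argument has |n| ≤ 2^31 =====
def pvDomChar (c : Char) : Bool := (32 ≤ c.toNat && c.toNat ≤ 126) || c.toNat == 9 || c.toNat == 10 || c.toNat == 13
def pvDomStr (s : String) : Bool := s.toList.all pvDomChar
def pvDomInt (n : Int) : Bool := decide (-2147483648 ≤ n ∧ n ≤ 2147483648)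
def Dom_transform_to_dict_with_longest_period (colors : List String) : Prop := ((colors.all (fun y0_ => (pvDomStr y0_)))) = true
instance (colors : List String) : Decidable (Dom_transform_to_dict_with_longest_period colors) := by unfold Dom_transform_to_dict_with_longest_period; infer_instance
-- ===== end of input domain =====

-- B replaces A's groupby run scan by a positions index (color -> index list) plus a per-color
-- streak scan; same O(n) cost, alternative decomposition. Equivalence is proved for all inputs.

-- ===== PORT A =====
-- itertools.groupby(pairs, key = second component): consecutive pairs with equal second
-- component are grouped; each group is represented by its (nonempty) list of pairs.
def pvGroupRuns : List (Int × String) → List (List (Int × String))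
  | [] => []
  | p :: rest =>
    match pvGroupRuns rest with
    | (q :: g) :: gs => if p.2 == q.2 then ((p :: q :: g) :: gs) else [p] :: (q :: g) :: gs
    | gs => [p] :: gs

-- the body of A's for-loop over (color, group) pairs (group's key = head's color)
def pvGroupStep (d : PySem.Dict String (Int × Int)) (g : List (Int × String)) :
    PySem.Dict String (Int × Int) :=
  match g with
  | [] => d  -- unreachable: groupby groups are nonempty
  | (i, c) :: _ =>
    let start := i
    let runLength : Int := (g.length : Int) - 1
    match d.get? c with
    | none => d.insert c (start, runLength)
    | some pr => if runLength > pr.2 then d.insert c (start, runLength) else d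

def transform_to_dict_with_longest_period (colors : List String) : List (String × Int) :=
  let longest := (pvGroupRuns (PySem.List.enumerate colors)).foldl pvGroupStep PySem.Dict.empty
  -- dict comprehension over the items of a dict: keys are distinct, so it is a map
  longest.items.map (fun pr => (pr.1, pr.2.1))

-- ===== PORT B =====
def pvBestStep : (Int × Int × Int × Int) → Int → (Int × Int × Int × Int)
  | (bs, bl, s, l), p =>
    if p = s + l then (bs, bl, s, l + 1)
    else if l > bl then (s, l, p, 1)
    else (bs, bl, p, 1)

def pvLongestRunStart : List Int → Int
  | [] => 0  -- unreachable: position lists (dict values) are nonempty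
  | p0 :: ps =>
    match ps.foldl pvBestStep (p0, 1, p0, 1) with
    | (bs, bl, s, l) => if l > bl then s else bs

def transform_to_dict_with_longest_period_alt (colors : List String) : List (String × Int) :=
  let positions := (PySem.List.enumerate colors).foldl
    (fun d p => d.modify p.2 [] (fun l => l ++ [p.1])) PySem.Dict.empty
  -- dict comprehension over the items of a dict: keys are distinct, so it is a map
  positions.items.map (fun pr => (pr.1, pvLongestRunStart pr.2))

-- ===== PRECONDITION & SPEC =====
def Spec_transform_to_dict_with_longest_period (colors : List String) (out : List (String × Int)) : Prop := out = transform_to_dict_with_longest_period_alt colors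
instance (colors : List String) (out : List (String × Int)) : Decidable (Spec_transform_to_dict_with_longest_period colors out) := by unfold Spec_transform_to_dict_with_longest_period; infer_instance

-- ===== CLAIM (what is proved, stated in full; the proofs are below) =====
def Claim_equal_transform_to_dict_with_longest_period : Prop := ∀ (colors : List String), Dom_transform_to_dict_with_longest_period colors → Spec_transform_to_dict_with_longest_period colors (transform_to_dict_with_longest_period colors)

-- ===== LEMMAS AND PROOFS =====

-- The maximal runs of a color list starting at index k: (start, color, length-1).
def pvRuns : Int → List String → List (Int × String × Nat)
  | _, [] => []
  | k, c :: rest =>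
    match pvRuns (k + 1) rest with
    | (s, c', e) :: rs => if c == c' then (k, c, e + 1) :: rs else (k, c, 0) :: (s, c', e) :: rs
    | [] => [(k, c, 0)]

def pvIntRange (s : Int) : Nat → List Int
  | 0 => []
  | n + 1 => s :: pvIntRange (s + 1) n

def pvBlock (r : Int × String × Nat) : List (Int × String) :=
  PySem.List.enumerate (List.replicate (r.2.2 + 1) r.2.1) r.1

-- A's per-group dict update, expressed on runs.
def pvStepA (d : PySem.Dict String (Int × Int)) (r : Int × String × Nat) : PySem.Dict String (Int × Int) :=
  match d.get? r.2.1 with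
  | none => d.insert r.2.1 (r.1, (r.2.2 : Int))
  | some pr => if (r.2.2 : Int) > pr.2 then d.insert r.2.1 (r.1, (r.2.2 : Int)) else d

-- best-(start,runlen) accumulator over a color's runs
def pvFoldBestP (p : Int × Int) : List (Int × String × Nat) → Int × Int
  | [] => p
  | r :: t => pvFoldBestP (if (r.2.2 : Int) > p.2 then (r.1, (r.2.2 : Int)) else p) t

def pvFoldBest (o : Option (Int × Int)) : List (Int × String × Nat) → Option (Int × Int)
  | [] => o
  | r :: t =>
    pvFoldBest (some (match o with
      | none => (r.1, (r.2.2 : Int))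
      | some pr => if (r.2.2 : Int) > pr.2 then (r.1, (r.2.2 : Int)) else pr)) t

-- B's main-loop abstraction over whole blocks
def pvStepB (b : Int × Int) (cur : Int × Int) : Int × Int :=
  if cur.2 > b.2 then cur else b

def pvMFold (b : Int × Int) (cur : Int × Int) : List (Int × String × Nat) → Int × Int × Int × Int
  | [] => (b.1, b.2, cur.1, cur.2)
  | r :: t => pvMFold (pvStepB b cur) (r.1, (r.2.2 : Int) + 1) t

def pvFinalize : Int × Int × Int × Int → Int
  | (bs, bl, s, l) => if l > bl then s else bs

def pvQ (r r' : Int × String × Nat) : Prop :=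
  (r.1 + (r.2.2 : Int) + 1 ≤ r'.1) ∧ (r.1 + (r.2.2 : Int) + 1 = r'.1 → r.2.1 ≠ r'.2.1)

lemma pvRuns_cons (k : Int) (c : String) (rest : List String) :
    ∃ e rs, pvRuns k (c :: rest) = (k, c, e) :: rs := by
  cases h : pvRuns (k + 1) rest with
  | nil => exact ⟨0, [], by simp [pvRuns, h]⟩
  | cons r rs =>
    obtain ⟨s, c', e⟩ := r
    by_cases hc : c == c'
    · exact ⟨e + 1, rs, by simp [pvRuns, h, hc]⟩
    · exact ⟨0, (s, c', e) :: rs, by simp [pvRuns, h, hc]⟩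

lemma pvRuns_nil_iff (k : Int) (xs : List String) : pvRuns k xs = [] ↔ xs = [] := by
  cases xs with
  | nil => simp [pvRuns]
  | cons c rest =>
    simp only [List.cons_ne_nil, iff_false]
    obtain ⟨e, rs, h⟩ := pvRuns_cons k c rest
    simp [h]

lemma pvIntRange_succ (s : Int) (n : Nat) : pvIntRange s (n + 1) = s :: pvIntRange (s + 1) n := rfl

lemma pvRuns_start (k : Int) (xs : List String) (r : Int × String × Nat)
    (rs : List (Int × String × Nat)) (h : pvRuns k xs = r :: rs) : r.1 = k := by
  cases xs with
  | nil => simp [pvRuns] at h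
  | cons c rest =>
    obtain ⟨e, rs', h'⟩ := pvRuns_cons k c rest
    rw [h'] at h
    cases h
    rfl

lemma pvBlock_cons (s : Int) (c : String) (e : Nat) :
    pvBlock (s, c, e) = (s, c) :: PySem.List.enumerate (List.replicate e c) (s + 1) := by
  simp only [pvBlock, List.replicate_succ, PySem.List.enumerate_cons]

lemma pvGroupRuns_enum (xs : List String) (k : Int) :
    pvGroupRuns (PySem.List.enumerate xs k) = (pvRuns k xs).map pvBlock := by
  induction xs generalizing k with
  | nil => simp [pvRuns, PySem.List.enumerate_nil, pvGroupRuns]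
  | cons c rest ih =>
    rw [PySem.List.enumerate_cons]
    have hih := ih (k + 1)
    cases hr : pvRuns (k + 1) rest with
    | nil =>
      have hre : rest = [] := (pvRuns_nil_iff _ _).mp hr
      subst hre
      simp [pvGroupRuns, pvRuns, PySem.List.enumerate_nil, pvBlock, PySem.List.enumerate_cons]
    | cons r rs =>
      obtain ⟨s', c', e⟩ := r
      have hs' : s' = k + 1 := pvRuns_start (k + 1) rest _ _ hr
      subst hs'
      rw [hr] at hih
      simp only [List.map_cons] at hih
      rw [pvBlock_cons] at hih
      simp only [pvGroupRuns]
      rw [hih]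
      by_cases hc : c == c'
      · have hce : c = c' := eq_of_beq hc
        have hrun : pvRuns k (c :: rest) = (k, c, e + 1) :: rs := by
          simp [pvRuns, hr, hc]
        rw [hrun]
        simp only [List.map_cons]
        rw [pvBlock_cons]
        simp only [hc, if_pos]
        subst hce
        rw [List.replicate_succ, PySem.List.enumerate_cons]
      · have hrun : pvRuns k (c :: rest) = (k, c, 0) :: (k + 1, c', e) :: rs := by
          simp [pvRuns, hr, hc]
        rw [hrun]
        simp only [List.map_cons]
        rw [pvBlock_cons, pvBlock_cons]
        simp only [hc]
        simp [PySem.List.enumerate_nil]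

lemma pvA_fold (xs : List String) :
    transform_to_dict_with_longest_period xs =
      ((pvRuns 0 xs).foldl pvStepA PySem.Dict.empty).items.map (fun pr => (pr.1, pr.2.1)) := by
  have hfun : ∀ (d : PySem.Dict String (Int × Int)) (r : Int × String × Nat),
      pvGroupStep d (pvBlock r) = pvStepA d r := by
    intro d r
    obtain ⟨s, c, e⟩ := r
    rw [pvBlock_cons]
    simp only [pvGroupStep, pvStepA]
    have hl : (((s, c) : Int × String) :: PySem.List.enumerate (List.replicate e c) (s + 1)).length
        = e + 1 := by
      simp [PySem.List.length_enumerate]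
    rw [hl]
    have he : (((e + 1 : Nat)) : Int) - 1 = (e : Int) := by push_cast; omega
    rw [he]
  unfold transform_to_dict_with_longest_period
  rw [pvGroupRuns_enum xs 0, List.foldl_map]
  simp only [hfun]

lemma pvGetA (rs : List (Int × String × Nat)) (d : PySem.Dict String (Int × Int)) (c : String) :
    (rs.foldl pvStepA d).get? c = pvFoldBest (d.get? c) (rs.filter (fun r => r.2.1 == c)) := by
  induction rs generalizing d with
  | nil => simp [pvFoldBest]
  | cons r t ih =>
    simp only [List.foldl_cons, List.filter_cons]
    by_cases hc : r.2.1 = c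
    · rw [if_pos (by simp [hc])]
      simp only [pvFoldBest]
      rw [ih]
      congr 1
      unfold pvStepA
      cases hd : d.get? r.2.1 with
      | none =>
        rw [hc] at hd
        rw [hd]
        simp only []
        rw [← hc, PySem.Dict.get?_insert_self]
      | some pr =>
        rw [hc] at hd
        rw [hd]
        simp only []
        by_cases hgt : (r.2.2 : Int) > pr.2
        · rw [if_pos hgt, if_pos hgt, ← hc, PySem.Dict.get?_insert_self]
        · rw [if_neg hgt, if_neg hgt, hd]
    · rw [if_neg (by simp [hc])]
      rw [ih]
      congr 1
      unfold pvStepA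
      cases hd : d.get? r.2.1 with
      | none =>
        simp only []
        rw [PySem.Dict.get?_insert_of_ne d _ (show c ≠ r.2.1 by intro h; exact hc h.symm)]
      | some pr =>
        simp only []
        by_cases hgt : (r.2.2 : Int) > pr.2
        · rw [if_pos hgt, PySem.Dict.get?_insert_of_ne d _ (show c ≠ r.2.1 by intro h; exact hc h.symm)]
        · rw [if_neg hgt]

lemma pvKeysA (rs : List (Int × String × Nat)) (d : PySem.Dict String (Int × Int)) :
    (rs.foldl pvStepA d).keys = PySem.Set.update d.keys (rs.map (fun r => r.2.1)) := by
  induction rs generalizing d with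
  | nil => simp [PySem.Set.update_nil]
  | cons r t ih =>
    simp only [List.foldl_cons, List.map_cons]
    rw [PySem.Set.update_cons, ih]
    congr 1
    unfold pvStepA
    cases hd : d.get? r.2.1 with
    | none =>
      simp only []
      have hnc : d.contains r.2.1 = false := by
        rw [PySem.Dict.contains_eq_isSome_get?, hd]; rfl
      rw [PySem.Dict.keys_insert_of_not_contains _ _ hnc]
      rw [PySem.Set.add_of_not_mem]
      intro hm
      rw [(PySem.Dict.contains_iff_mem_keys d r.2.1).mpr hm] at hnc  -- guess name
      exact Bool.noConfusion hnc
    | some pr =>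
      simp only []
      have hcn : d.contains r.2.1 = true := by
        rw [PySem.Dict.contains_eq_isSome_get?, hd]; rfl
      have hmem : r.2.1 ∈ d.keys := (PySem.Dict.contains_iff_mem_keys d r.2.1).mp hcn
      by_cases hgt : (r.2.2 : Int) > pr.2
      · rw [if_pos hgt, PySem.Dict.keys_insert_of_contains _ _ hcn, PySem.Set.add_of_mem hmem]
      · rw [if_neg hgt, PySem.Set.add_of_mem hmem]

lemma pvRunColors (xs : List String) (k : Int) (s : PySem.Set String) :
    PySem.Set.update s ((pvRuns k xs).map (fun r => r.2.1)) = PySem.Set.update s xs := by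
  induction xs generalizing k s with
  | nil => simp [pvRuns]
  | cons c rest ih =>
    cases hr : pvRuns (k + 1) rest with
    | nil =>
      have hre : rest = [] := (pvRuns_nil_iff _ _).mp hr
      subst hre
      simp [pvRuns]
    | cons r rs =>
      obtain ⟨s', c', e⟩ := r
      have hih := ih (k + 1) (PySem.Set.add s c)
      rw [hr] at hih
      simp only [List.map_cons] at hih
      rw [PySem.Set.update_cons] at hih
      by_cases hc : c == c'
      · have hce : c = c' := eq_of_beq hc
        have hrun : pvRuns k (c :: rest) = (k, c, e + 1) :: rs := by
          simp [pvRuns, hr, hc]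
        rw [hrun]
        simp only [List.map_cons]
        rw [PySem.Set.update_cons, PySem.Set.update_cons]
        have hmem : c ∈ PySem.Set.add s c := (PySem.Set.mem_add s c c).mpr (Or.inr rfl)
        rw [← hce, PySem.Set.add_of_mem hmem] at hih
        exact hih
      · have hrun : pvRuns k (c :: rest) = (k, c, 0) :: (s', c', e) :: rs := by
          simp [pvRuns, hr, hc]
        rw [hrun]
        simp only [List.map_cons]
        rw [PySem.Set.update_cons, PySem.Set.update_cons]
        exact hih

lemma pvOccFlatten (xs : List String) (k : Int) (c : String) :
    ((PySem.List.enumerate xs k).filter (fun p => p.2 == c)).map (fun p => p.1) =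
      ((pvRuns k xs).filter (fun r => r.2.1 == c)).flatMap (fun r => pvIntRange r.1 (r.2.2 + 1)) := by
  induction xs generalizing k with
  | nil => simp [pvRuns, PySem.List.enumerate_nil]
  | cons c0 rest ih =>
    rw [PySem.List.enumerate_cons]
    have hih := ih (k + 1)
    cases hr : pvRuns (k + 1) rest with
    | nil =>
      have hre : rest = [] := (pvRuns_nil_iff _ _).mp hr
      subst hre
      by_cases hc : c0 == c
      · simp [pvRuns, PySem.List.enumerate_nil, hc, pvIntRange]
      · simp [pvRuns, PySem.List.enumerate_nil, hc]
    | cons r rs =>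
      obtain ⟨s', c', e⟩ := r
      have hs' : s' = k + 1 := pvRuns_start (k + 1) rest _ _ hr
      subst hs'
      rw [hr] at hih
      by_cases hcc : c0 == c'
      · have hce : c0 = c' := eq_of_beq hcc
        subst hce
        have hrun : pvRuns k (c0 :: rest) = (k, c0, e + 1) :: rs := by
          simp [pvRuns, hr]
        rw [hrun]
        by_cases hc : c0 == c
        · rw [List.filter_cons_of_pos (by simpa using hc),
              List.filter_cons_of_pos (by simpa using hc)]
          rw [List.filter_cons_of_pos (by simpa using hc)] at hih
          simp only [List.map_cons, List.flatMap_cons] at hih ⊢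
          rw [pvIntRange_succ]
          simp only [List.cons_append]
          rw [hih]
        · rw [List.filter_cons_of_neg (by simpa using hc),
              List.filter_cons_of_neg (by simpa using hc)]
          rw [List.filter_cons_of_neg (by simpa using hc)] at hih
          exact hih
      · have hrun : pvRuns k (c0 :: rest) = (k, c0, 0) :: (k + 1, c', e) :: rs := by
          simp [pvRuns, hr, hcc]
        rw [hrun]
        by_cases hc : c0 == c
        · rw [List.filter_cons_of_pos (by simpa using hc),
              List.filter_cons_of_pos (by simpa using hc)]
          simp only [List.map_cons, List.flatMap_cons]
          rw [hih]
          rfl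
        · rw [List.filter_cons_of_neg (by simpa using hc),
              List.filter_cons_of_neg (by simpa using hc)]
          exact hih

lemma pvRunsPairwise (xs : List String) (k : Int) : (pvRuns k xs).Pairwise pvQ := by
  induction xs generalizing k with
  | nil => simp [pvRuns]
  | cons c rest ih =>
    cases hr : pvRuns (k + 1) rest with
    | nil =>
      have hre : rest = [] := (pvRuns_nil_iff _ _).mp hr
      subst hre
      simp [pvRuns]
    | cons r rs =>
      obtain ⟨s', c', e⟩ := r
      have hs' : s' = k + 1 := pvRuns_start (k + 1) rest _ _ hr
      subst hs'
      have hih := ih (k + 1)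
      rw [hr] at hih
      rw [List.pairwise_cons] at hih
      obtain ⟨hhead, htail⟩ := hih
      by_cases hc : c == c'
      · have hrun : pvRuns k (c :: rest) = (k, c, e + 1) :: rs := by
          simp [pvRuns, hr, hc]
        rw [hrun, List.pairwise_cons]
        refine ⟨?_, htail⟩
        intro r' hr'
        have hce : c = c' := eq_of_beq hc
        obtain ⟨h1, h2⟩ := hhead r' hr'
        subst hce
        constructor
        · simp only [] at h1 ⊢
          push_cast at h1 ⊢
          omega
        · intro heq
          apply h2
          push_cast at heq ⊢
          omega
      · have hrun : pvRuns k (c :: rest) = (k, c, 0) :: (k + 1, c', e) :: rs := by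
          simp [pvRuns, hr, hc]
        rw [hrun, List.pairwise_cons]
        constructor
        · intro r' hr'
          rcases List.mem_cons.mp hr' with hr' | hr'
          · subst hr'
            refine ⟨by push_cast; omega, fun _ => ?_⟩
            simp only []
            intro hce
            exact hc (by simp [hce])
          · obtain ⟨h1, _⟩ := hhead r' hr'
            refine ⟨by push_cast at h1 ⊢; omega, fun heq => absurd heq (by push_cast at h1 ⊢; omega)⟩
        · rw [List.pairwise_cons]
          exact ⟨hhead, htail⟩

lemma pvW (m : Nat) (bs bl s l : Int) :
    (pvIntRange (s + l) m).foldl pvBestStep (bs, bl, s, l) = (bs, bl, s, l + m) := by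
  induction m generalizing l with
  | zero => simp [pvIntRange]
  | succ n ih =>
    rw [pvIntRange_succ]
    simp only [List.foldl_cons, pvBestStep, if_pos trivial]
    have h1 : s + l + 1 = s + (l + 1) := by omega
    rw [h1, ih]
    simp only [Prod.mk.injEq]
    exact ⟨trivial, trivial, trivial, by push_cast; omega⟩

lemma pvM (rest : List (Int × String × Nat)) (b cur : Int × Int)
    (h : ((cur :: rest.map (fun r => (r.1, (r.2.2 : Int) + 1))).Pairwise
      (fun a b => a.1 + a.2 < b.1))) :
    (rest.flatMap (fun r => pvIntRange r.1 (r.2.2 + 1))).foldl pvBestStep (b.1, b.2, cur.1, cur.2)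
      = pvMFold b cur rest := by
  induction rest generalizing b cur with
  | nil => simp [pvMFold]
  | cons r t ih =>
    rw [List.flatMap_cons, List.foldl_append]
    rw [pvIntRange_succ]
    simp only [List.foldl_cons]
    rw [List.pairwise_cons] at h
    obtain ⟨hhead, htail⟩ := h
    have hlt : cur.1 + cur.2 < r.1 := by
      have := hhead (r.1, (r.2.2 : Int) + 1) (by simp)
      simpa using this
    have hstep : pvBestStep (b.1, b.2, cur.1, cur.2) r.1 =
        ((pvStepB b cur).1, (pvStepB b cur).2, r.1, 1) := by
      simp only [pvBestStep, pvStepB]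
      rw [if_neg (by omega)]
      by_cases hcb : cur.2 > b.2
      · rw [if_pos hcb, if_pos hcb]
      · rw [if_neg hcb, if_neg hcb]
    rw [hstep]
    have hw := pvW r.2.2 (pvStepB b cur).1 (pvStepB b cur).2 r.1 1
    rw [hw]
    have htail' : (((r.1, (r.2.2 : Int) + 1) :: t.map (fun r => (r.1, (r.2.2 : Int) + 1))).Pairwise
        (fun a b => a.1 + a.2 < b.1)) := htail
    have := ih (pvStepB b cur) (r.1, (r.2.2 : Int) + 1) htail'
    simp only [] at this
    rw [show (1 : Int) + (r.2.2 : Int) = (r.2.2 : Int) + 1 by omega]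
    rw [this]
    rfl

lemma pvC (rest : List (Int × String × Nat)) (p : Int × Int) (s e : Int) :
    pvFinalize (pvMFold (p.1, p.2 + 1) (s, e + 1) rest) =
      (pvFoldBestP (if e > p.2 then (s, e) else p) rest).1 := by
  induction rest generalizing p s e with
  | nil =>
    simp only [pvMFold, pvFoldBestP, pvFinalize]
    by_cases hc : e > p.2
    · rw [if_pos (by omega), if_pos hc]
    · rw [if_neg (by omega), if_neg hc]
  | cons r t ih =>
    simp only [pvMFold, pvFoldBestP]
    have hb : pvStepB (p.1, p.2 + 1) (s, e + 1) =
        ((if e > p.2 then (s, e) else p).1, (if e > p.2 then (s, e) else p).2 + 1) := by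
      simp only [pvStepB]
      by_cases hc : e > p.2
      · rw [if_pos (show e + 1 > p.2 + 1 by omega), if_pos hc]
      · rw [if_neg (show ¬ (e + 1 > p.2 + 1) by omega), if_neg hc]
    rw [hb]
    exact ih (if e > p.2 then (s, e) else p) r.1 (r.2.2 : Int)

lemma pvFoldBest_some (rs : List (Int × String × Nat)) (p : Int × Int) :
    pvFoldBest (some p) rs = some (pvFoldBestP p rs) := by
  induction rs generalizing p with
  | nil => rfl
  | cons r t ih => simp only [pvFoldBest, pvFoldBestP]; exact ih _

-- ===== VERDICT (by name: the statement is the Claim_ definition above) =====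
lemma pvPerColor (xs : List String) (c : String) (hcx : c ∈ xs) :
    (((pvRuns 0 xs).foldl pvStepA PySem.Dict.empty).getD c ((0 : Int), (0 : Int))).1 =
      pvLongestRunStart
        (((pvRuns 0 xs).filter (fun r => r.2.1 == c)).flatMap
          (fun r => pvIntRange r.1 (r.2.2 + 1))) := by
  -- the runs of color c are nonempty
  have hrcols : PySem.Set.ofList ((pvRuns 0 xs).map (fun r => r.2.1)) = PySem.Set.ofList xs := by
    have h2 := pvRunColors xs 0 []
    rw [PySem.Set.update_nil_left, PySem.Set.update_nil_left] at h2
    exact h2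
  have hmemrc : c ∈ (pvRuns 0 xs).map (fun r => r.2.1) := by
    have : c ∈ PySem.Set.ofList ((pvRuns 0 xs).map (fun r => r.2.1)) := by
      rw [hrcols]
      exact (PySem.Set.mem_ofList xs c).mpr hcx
    exact (PySem.Set.mem_ofList _ c).mp this
  have hne : (pvRuns 0 xs).filter (fun r => r.2.1 == c) ≠ [] := by
    intro hnil
    obtain ⟨r, hrmem, hrc⟩ := List.mem_map.mp hmemrc
    exact (List.filter_eq_nil_iff.mp hnil r hrmem) (by simp [hrc])
  cases hrc : (pvRuns 0 xs).filter (fun r => r.2.1 == c) with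
  | nil => exact absurd hrc hne
  | cons r0 t =>
    -- pairwise separation of the runs of color c
    have hpw : ((pvRuns 0 xs).filter (fun r => r.2.1 == c)).Pairwise pvQ :=
      List.Pairwise.sublist List.filter_sublist (pvRunsPairwise xs 0)
    have hcol : ∀ r ∈ (pvRuns 0 xs).filter (fun r => r.2.1 == c), r.2.1 = c := by
      intro r hr
      exact eq_of_beq (List.mem_filter.mp hr).2
    have hpairs : (((r0 :: t).map (fun r => (r.1, (r.2.2 : Int) + 1))).Pairwise
        (fun a b => a.1 + a.2 < b.1)) := by
      rw [List.pairwise_map]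
      rw [← hrc]
      refine List.Pairwise.imp_of_mem ?_ hpw
      intro a b ha hb hq
      obtain ⟨h1, h2⟩ := hq
      have hca := hcol a ha
      have hcb := hcol b hb
      have hne' : a.1 + (a.2.2 : Int) + 1 ≠ b.1 := by
        intro heq
        exact h2 heq (by rw [hca, hcb])
      simp only []
      omega
    -- A's value at c
    have hgA : ((pvRuns 0 xs).foldl pvStepA PySem.Dict.empty).get? c =
        some (pvFoldBestP (r0.1, (r0.2.2 : Int)) t) := by
      rw [pvGetA, PySem.Dict.get?_empty, hrc]
      simp only [pvFoldBest]
      rw [pvFoldBest_some]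
    rw [PySem.Dict.getD_of_get?_eq_some _ _ hgA]
    -- B's value at c
    rw [List.flatMap_cons, pvIntRange_succ, List.cons_append]
    simp only [pvLongestRunStart]
    rw [List.foldl_append]
    have hw := pvW r0.2.2 r0.1 1 r0.1 1
    rw [hw]
    rw [show (1 : Int) + (r0.2.2 : Int) = (r0.2.2 : Int) + 1 by omega]
    rw [List.map_cons] at hpairs
    rw [pvM t (r0.1, 1) (r0.1, (r0.2.2 : Int) + 1) hpairs]
    have hC := pvC t (r0.1, 0) r0.1 (r0.2.2 : Int)
    rw [show ((0 : Int) + 1) = (1 : Int) by omega] at hC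
    have hif : (if (r0.2.2 : Int) > ((r0.1, (0 : Int)).2) then (r0.1, (r0.2.2 : Int))
        else ((r0.1, (0 : Int)))) = (r0.1, (r0.2.2 : Int)) := by
      by_cases h : (r0.2.2 : Int) > 0
      · rw [if_pos h]
      · rw [if_neg h]
        have h0 : (r0.2.2 : Int) = 0 := by omega
        rw [h0]
    rw [hif] at hC
    exact hC.symm

theorem transform_to_dict_with_longest_period_spec : Claim_equal_transform_to_dict_with_longest_period := by
  intro xs _
  unfold Spec_transform_to_dict_with_longest_period
  rw [pvA_fold]
  -- A's dict: keys and items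
  have hAkeys : ((pvRuns 0 xs).foldl pvStepA PySem.Dict.empty).keys = PySem.Set.ofList xs := by
    rw [pvKeysA, PySem.Dict.keys_empty, PySem.Set.update_nil_left]
    have h2 := pvRunColors xs 0 []
    rw [PySem.Set.update_nil_left, PySem.Set.update_nil_left] at h2
    exact h2
  have hAnodup : ((pvRuns 0 xs).foldl pvStepA PySem.Dict.empty).keys.Nodup := by
    rw [hAkeys]; exact PySem.Set.nodup_ofList xs
  rw [PySem.Dict.items_eq_map_keys _ hAnodup ((0 : Int), (0 : Int)), hAkeys, List.map_map]
  -- B's dict: keys and items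
  simp only [transform_to_dict_with_longest_period_alt]
  have hBkeys : ((PySem.List.enumerate xs 0).foldl
      (fun d p => d.modify p.2 [] (fun l => l ++ [p.1])) PySem.Dict.empty).keys =
      PySem.Set.ofList xs := by
    rw [PySem.Dict.keys_foldl_modify_key (PySem.List.enumerate xs 0) (fun p => p.2) []
      (fun _ p => (fun l => l ++ [p.1])) PySem.Dict.empty]
    rw [PySem.Dict.keys_empty, PySem.List.map_snd_enumerate, PySem.Set.update_nil_left]
  have hBnodup : ((PySem.List.enumerate xs 0).foldl
      (fun d p => d.modify p.2 [] (fun l => l ++ [p.1])) PySem.Dict.empty).keys.Nodup := by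
    rw [hBkeys]; exact PySem.Set.nodup_ofList xs
  rw [PySem.Dict.items_eq_map_keys _ hBnodup [], hBkeys, List.map_map]
  apply List.map_congr_left
  intro c hc
  have hcx : c ∈ xs := (PySem.Set.mem_ofList xs c).mp hc
  simp only [Function.comp]
  -- B's position list for c is the flattening of c's runs
  have hgetB : ((PySem.List.enumerate xs 0).foldl
      (fun d p => d.modify p.2 [] (fun l => l ++ [p.1])) PySem.Dict.empty).getD c [] =
      ((pvRuns 0 xs).filter (fun r => r.2.1 == c)).flatMap
        (fun r => pvIntRange r.1 (r.2.2 + 1)) := by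
    have hswap : (PySem.List.enumerate xs 0).foldl
        (fun d p => d.modify p.2 [] (fun l => l ++ [p.1])) PySem.Dict.empty =
        ((PySem.List.enumerate xs 0).map Prod.swap).foldl
          (fun d q => d.modify q.1 [] (fun l => l ++ [q.2])) PySem.Dict.empty := by
      rw [List.foldl_map]
      simp only [Prod.fst_swap, Prod.snd_swap]
    rw [hswap, PySem.Dict.getD_foldl_modify_append, PySem.Dict.getD_empty]
    rw [List.filter_map, List.map_map]
    rw [← pvOccFlatten xs 0 c]
    simp [Function.comp_def]
  rw [hgetB]
  exact congrArg (fun v => (c, v)) (pvPerColor xs c hcx)
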